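-- pv_equiv track=rewrite | github.com/mnergizci/licsar_proc | python/LiCSAR_lib/framecare.py | bursts_group_to_iws
-- ===== SOURCE A (Python) =====
-- def bursts_group_to_iws(bidtanxs):
--     iw1s = []
--     iw2s = []
--     iw3s = []
--     for bidt in bidtanxs:
--         if 'IW1' in bidt:
--             iw1s.append(bidt)
--         if 'IW2' in bidt:
--             iw2s.append(bidt)
--         if 'IW3' in bidt:
--             iw3s.append(bidt)
--     iw1s.sort()
--     iw2s.sort()
--     iw3s.sort()
--     return [iw1s, iw2s, iw3s]
-- ===== SOURCE B (Python) =====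
-- def bursts_group_to_iws(bidtanxs):
--     s = sorted(bidtanxs)
--     return [[b for b in s if 'IW1' in b],
--             [b for b in s if 'IW2' in b],
--             [b for b in s if 'IW3' in b]]
-- ===== Notes on version B (the rewrite author's own statement) =====
-- stated objective: simpler
-- what changed: Instead of bucketing into three lists and sorting each bucket, B sorts the input once and then partitions the sorted list with three filters (sort hoisted before grouping).
import Mathlib
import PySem

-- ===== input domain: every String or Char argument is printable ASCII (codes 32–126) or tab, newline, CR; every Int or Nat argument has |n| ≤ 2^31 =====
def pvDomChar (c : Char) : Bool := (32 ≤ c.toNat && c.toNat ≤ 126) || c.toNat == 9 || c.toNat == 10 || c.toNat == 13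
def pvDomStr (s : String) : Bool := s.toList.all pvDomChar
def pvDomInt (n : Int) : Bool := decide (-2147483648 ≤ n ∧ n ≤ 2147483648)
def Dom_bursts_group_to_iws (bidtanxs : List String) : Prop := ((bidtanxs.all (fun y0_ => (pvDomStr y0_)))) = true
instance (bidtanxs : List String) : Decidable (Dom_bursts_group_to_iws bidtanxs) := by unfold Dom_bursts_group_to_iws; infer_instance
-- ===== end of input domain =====

-- B replaces A's bucket-then-sort-each-group with one global sort followed by three
-- filtering passes (objective: simpler); same return value, no side effects involved.
-- ===== PORT A =====
-- literal port of A: bucket into three lists (multi-membership appends to each), then sort each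
def bursts_group_to_iws (bidtanxs : List String) : List (List String) :=
  let st := bidtanxs.foldl (fun (acc : List String × List String × List String) bidt =>
    let acc := if PySem.Str.isIn "IW1" bidt then (acc.1 ++ [bidt], acc.2.1, acc.2.2) else acc
    let acc := if PySem.Str.isIn "IW2" bidt then (acc.1, acc.2.1 ++ [bidt], acc.2.2) else acc
    if PySem.Str.isIn "IW3" bidt then (acc.1, acc.2.1, acc.2.2 ++ [bidt]) else acc)
    ([], [], [])
  [PySem.List.sorted st.1 (fun x => x) false,
   PySem.List.sorted st.2.1 (fun x => x) false,
   PySem.List.sorted st.2.2 (fun x => x) false]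

-- ===== PORT B =====
-- port of B: sort once, then partition the sorted list by the three IW markers
def bursts_group_to_iws_alt (bidtanxs : List String) : List (List String) :=
  let s := PySem.List.sorted bidtanxs (fun x => x) false
  [s.filter (fun b => PySem.Str.isIn "IW1" b),
   s.filter (fun b => PySem.Str.isIn "IW2" b),
   s.filter (fun b => PySem.Str.isIn "IW3" b)]

-- ===== PRECONDITION & SPEC =====
def Spec_bursts_group_to_iws (bidtanxs : List String) (out : List (List String)) : Prop := out = bursts_group_to_iws_alt bidtanxs
instance (bidtanxs : List String) (out : List (List String)) : Decidable (Spec_bursts_group_to_iws bidtanxs out) := by unfold Spec_bursts_group_to_iws; infer_instance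

-- ===== CLAIM (what is proved, stated in full; the proofs are below) =====
def Claim_equal_bursts_group_to_iws : Prop := ∀ (bidtanxs : List String), Dom_bursts_group_to_iws bidtanxs → Spec_bursts_group_to_iws bidtanxs (bursts_group_to_iws bidtanxs)

-- ===== LEMMAS AND PROOFS =====

-- the bucketing fold accumulates exactly the three filters
theorem pvFoldBuckets (l : List String) (a b c : List String) :
    l.foldl (fun (acc : List String × List String × List String) bidt =>
      let acc := if PySem.Str.isIn "IW1" bidt then (acc.1 ++ [bidt], acc.2.1, acc.2.2) else acc
      let acc := if PySem.Str.isIn "IW2" bidt then (acc.1, acc.2.1 ++ [bidt], acc.2.2) else acc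
      if PySem.Str.isIn "IW3" bidt then (acc.1, acc.2.1, acc.2.2 ++ [bidt]) else acc)
      (a, b, c)
    = (a ++ l.filter (fun x => PySem.Str.isIn "IW1" x),
       b ++ l.filter (fun x => PySem.Str.isIn "IW2" x),
       c ++ l.filter (fun x => PySem.Str.isIn "IW3" x)) := by
  induction l generalizing a b c with
  | nil => simp
  | cons x t ih =>
    simp only [List.foldl_cons, List.filter_cons]
    split_ifs <;> rw [ih] <;> simp

-- filtering a stably sorted list = sorting the filtered list (identity key)
theorem pvSortedFilter (p : String → Bool) (xs : List String) :
    (PySem.List.sorted xs (fun x => x) false).filter p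
      = PySem.List.sorted (xs.filter p) (fun x => x) false := by
  exact (PySem.List.sorted_id_eq_of_perm_of_pairwise (xs.filter p) _
    ((PySem.List.sorted_perm xs (fun x => x) false).filter p)
    ((PySem.List.sorted_pairwise xs (fun x => x)).filter p)).symm

-- ===== VERDICT (by name: the statement is the Claim_ definition above) =====
theorem bursts_group_to_iws_spec : Claim_equal_bursts_group_to_iws := by
  intro bidtanxs _
  unfold Spec_bursts_group_to_iws bursts_group_to_iws bursts_group_to_iws_alt
  simp only [pvFoldBuckets, List.nil_append, pvSortedFilter]
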